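-- pv_equiv track=rewrite | github.com/pytorch/torchtitan | torchtitan/experiments/flex_shard/flex_shard.py | _module_path_common_prefix
-- ===== SOURCE A (Python) =====
-- def _module_path_common_prefix(paths: list[str]) -> str:
--     """Return the common module path prefix for parameter-owner module paths."""
--     if not paths:
--         return ""
--     common_parts = paths[0].split(".") if paths[0] else []
--     for path in paths[1:]:
--         parts = path.split(".") if path else []
--         limit = min(len(common_parts), len(parts))
--         i = 0
--         while i < limit and common_parts[i] == parts[i]:
--             i += 1
--         common_parts = common_parts[:i]
--         if not common_parts:
--             break
--     return ".".join(common_parts)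
-- ===== SOURCE B (Python) =====
-- def _module_path_common_prefix(paths: list[str]) -> str:
--     """Return the common module path prefix for parameter-owner module paths."""
--     if not paths:
--         return ""
--     parts_lists = [p.split(".") if p else [] for p in paths]
--     prefix = []
--     for col in zip(*parts_lists):
--         if all(x == col[0] for x in col):
--             prefix.append(col[0])
--         else:
--             break
--     return ".".join(prefix)
-- ===== Notes on version B (the rewrite author's own statement) =====
-- stated objective: alternative
-- what changed: A trims a running common-prefix list pairwise against each subsequent path with an index-based while loop; B splits all paths up front and scans column-wise over zip(*parts_lists), appending a component while all entries of the column agree.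
import Mathlib
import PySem

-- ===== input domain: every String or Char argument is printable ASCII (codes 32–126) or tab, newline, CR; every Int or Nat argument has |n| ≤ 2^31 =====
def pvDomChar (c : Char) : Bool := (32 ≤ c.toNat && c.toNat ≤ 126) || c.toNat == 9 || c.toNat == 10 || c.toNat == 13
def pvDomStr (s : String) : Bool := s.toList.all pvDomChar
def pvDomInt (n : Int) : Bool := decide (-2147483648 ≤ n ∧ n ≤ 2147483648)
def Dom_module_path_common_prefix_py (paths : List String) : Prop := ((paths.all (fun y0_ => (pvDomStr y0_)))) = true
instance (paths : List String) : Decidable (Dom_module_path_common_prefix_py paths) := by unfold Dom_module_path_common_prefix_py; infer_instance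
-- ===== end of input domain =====

-- B replaces A's pairwise prefix-trimming loop by a single column-wise scan over zip(*parts_lists); objective: alternative decomposition.

-- p.split(".") if p else []  (the same expression occurs in both Pythons; sep "." is nonempty so Chars.splitOn is exact)
def pvSplit (p : String) : List String :=
  if p ≠ "" then (PySem.Chars.splitOn p.toList ['.']).map (fun cs => String.ofList cs) else []

-- ===== PORT A =====
-- the while loop: i = 0; while i < limit and common_parts[i] == parts[i]: i += 1
-- (indices are in range whenever i < limit = min of the lengths, so List.getD is exact here)
def pvWhileA (common parts : List String) (limit : Nat) (i : Nat) : Nat :=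
  if i < limit ∧ common.getD i "" = parts.getD i "" then pvWhileA common parts limit (i + 1)
  else i
termination_by limit - i
decreasing_by omega

-- for path in paths[1:]: …  (the 'if not common_parts: break' is the early exit)
def pvLoopA (common : List String) (rest : List String) : List String :=
  match rest with
  | [] => common
  | path :: rest =>
    let parts := pvSplit path
    let limit := min common.length parts.length
    let i := pvWhileA common parts limit 0
    let common' := common.take i          -- common_parts[:i]
    if common' = [] then common' else pvLoopA common' rest

def module_path_common_prefix_py (paths : List String) : String :=
  match paths with
  | [] => ""
  | p0 :: rest => PySem.Str.join "." (pvLoopA (pvSplit p0) rest)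

-- ===== PORT B =====
-- zip(*parts_lists): take one column (the heads) while every list is nonempty, then recurse on the tails
def pvZipStar (lists : List (List String)) : List (List String) :=
  match lists with
  | [] => []
  | l :: ls =>
    if l ≠ [] ∧ ls.all (fun x => x ≠ []) then
      (l.headD "" :: ls.map (fun x => x.headD "")) :: pvZipStar (l.tail :: ls.map (fun x => x.tail))
    else []
termination_by (lists.headD []).length
decreasing_by
  rename_i h
  simp only [List.headD_cons, List.length_tail]
  have : l ≠ [] := h.1
  cases l with
  | nil => exact absurd rfl this
  | cons a t => simp

-- for col in zip(*…): if all(x == col[0] …): prefix.append(col[0]) else: break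
def pvPrefixB (cols : List (List String)) : List String :=
  match cols with
  | [] => []
  | col :: rest =>
    let h := col.headD ""                 -- col[0] (columns are never empty)
    if col.all (fun x => x = h) then h :: pvPrefixB rest else []

def module_path_common_prefix_py_alt (paths : List String) : String :=
  match paths with
  | [] => ""
  | _ :: _ => PySem.Str.join "." (pvPrefixB (pvZipStar (paths.map pvSplit)))

-- ===== PRECONDITION & SPEC =====
def Spec_module_path_common_prefix_py (paths : List String) (out : String) : Prop := out = module_path_common_prefix_py_alt paths
instance (paths : List String) (out : String) : Decidable (Spec_module_path_common_prefix_py paths out) := by unfold Spec_module_path_common_prefix_py; infer_instance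

-- ===== CLAIM (what is proved, stated in full; the proofs are below) =====
def Claim_equal_module_path_common_prefix_py : Prop := ∀ (paths : List String), Dom_module_path_common_prefix_py paths → Spec_module_path_common_prefix_py paths (module_path_common_prefix_py paths)

-- ===== LEMMAS AND PROOFS =====

-- longest common prefix of two lists (the mathematical reference both ports are compared to)
def cp2 : List String → List String → List String
  | a :: as, b :: bs => if a = b then a :: cp2 as bs else []
  | _, _ => []

theorem cp2_nil_left (b : List String) : cp2 [] b = [] := by cases b <;> rfl
theorem cp2_nil_right (a : List String) : cp2 a [] = [] := by cases a <;> rfl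

theorem foldl_cp2_nil (ls : List (List String)) : List.foldl cp2 [] ls = [] := by
  induction ls with
  | nil => rfl
  | cons l ls ih => simpa [cp2_nil_left] using ih

theorem cp2_take (a b : List String) : a.take (cp2 a b).length = cp2 a b := by
  induction a generalizing b with
  | nil => simp [cp2_nil_left]
  | cons x as ih =>
    cases b with
    | nil => simp [cp2_nil_right]
    | cons y bs => by_cases h : x = y <;> simp [cp2, h, ih]

theorem pvWhileA_eq (common parts : List String) (i : Nat)
    (hi : i ≤ min common.length parts.length) :
    pvWhileA common parts (min common.length parts.length) i
      = i + (cp2 (common.drop i) (parts.drop i)).length := by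
  rw [pvWhileA]
  by_cases h : i < min common.length parts.length ∧ common.getD i "" = parts.getD i ""
  · simp only [h]
    have hc : i < common.length := by omega
    have hp : i < parts.length := by omega
    have e1 : common.drop i = common[i] :: common.drop (i + 1) := List.drop_eq_getElem_cons hc
    have e2 : parts.drop i = parts[i] :: parts.drop (i + 1) := List.drop_eq_getElem_cons hp
    have heq : common[i] = parts[i] := by
      have := h.2
      simpa [List.getD, hc, hp] using this
    rw [pvWhileA_eq common parts (i + 1) (by omega), e1, e2]
    simp [cp2, heq]
    omega
  · simp only [h, if_false]
    rcases Nat.lt_or_ge i (min common.length parts.length) with hlt | hge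
    · -- mismatch at i
      have hc : i < common.length := by omega
      have hp : i < parts.length := by omega
      have e1 : common.drop i = common[i] :: common.drop (i + 1) := List.drop_eq_getElem_cons hc
      have e2 : parts.drop i = parts[i] :: parts.drop (i + 1) := List.drop_eq_getElem_cons hp
      have hne : common[i] ≠ parts[i] := by
        intro he
        exact h ⟨hlt, by simp [List.getD, hc, hp, he]⟩
      rw [e1, e2]
      simp [cp2, hne]
    · -- i = limit: one of the drops is empty
      have : common.drop i = [] ∨ parts.drop i = [] := by
        rcases Nat.le_total common.length parts.length with hle | hle
        · left; exact List.drop_eq_nil_of_le (by omega)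
        · right; exact List.drop_eq_nil_of_le (by omega)
      rcases this with e | e <;> simp [e, cp2_nil_left, cp2_nil_right]
termination_by min common.length parts.length - i
decreasing_by omega

theorem pvWhileA_take (common parts : List String) :
    common.take (pvWhileA common parts (min common.length parts.length) 0) = cp2 common parts := by
  rw [pvWhileA_eq common parts 0 (Nat.zero_le _)]
  simpa using cp2_take common parts

theorem pvLoopA_foldl (common : List String) (rest : List String) :
    pvLoopA common rest = List.foldl cp2 common (rest.map pvSplit) := by
  induction rest generalizing common with
  | nil => rfl
  | cons path rest ih =>
    show (let parts := pvSplit path;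
          let limit := min common.length parts.length;
          let i := pvWhileA common parts limit 0;
          let common' := common.take i;
          if common' = [] then common' else pvLoopA common' rest)
        = List.foldl cp2 common ((path :: rest).map pvSplit)
    simp only [List.map_cons, List.foldl_cons, pvWhileA_take common (pvSplit path)]
    by_cases h : cp2 common (pvSplit path) = []
    · simp [h, foldl_cp2_nil]
    · simp [h, ih]

-- one step of foldl cp2 across all heads when every list starts with h
theorem foldl_cp2_step (ls : List (List String)) (h : String) (t : List String)
    (hall : ∀ l ∈ ls, l ≠ [] ∧ l.headD "" = h) :
    List.foldl cp2 (h :: t) ls = h :: List.foldl cp2 t (ls.map (fun x => x.tail)) := by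
  induction ls generalizing t with
  | nil => rfl
  | cons l ls ih =>
    obtain ⟨hne, hh⟩ := hall l (by simp)
    obtain ⟨u, rfl⟩ : ∃ u, l = h :: u := by
      cases l with
      | nil => exact absurd rfl hne
      | cons a u => exact ⟨u, by simp_all⟩
    simp only [List.foldl_cons, List.map_cons, List.tail_cons, cp2, if_pos]
    exact ih (cp2 t u) (fun l hl => hall l (List.mem_cons_of_mem _ hl))

-- the prefix dies: some later list is empty or disagrees on the head
theorem foldl_cp2_dead (ls : List (List String)) (l0 : List String)
    (hbad : ∃ l ∈ ls, l = [] ∨ l.headD "" ≠ l0.headD "") (hne : l0 ≠ []) :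
    List.foldl cp2 l0 ls = [] := by
  induction ls generalizing l0 with
  | nil => simp at hbad
  | cons l ls ih =>
    obtain ⟨x, hx, hcase⟩ := hbad
    rcases List.mem_cons.mp hx with rfl | hx'
    · have : cp2 l0 x = [] := by
        cases l0 with
        | nil => exact absurd rfl hne
        | cons a t =>
          rcases hcase with rfl | hh
          · exact cp2_nil_right _
          · cases x with
            | nil => exact cp2_nil_right _
            | cons b u =>
              have : a ≠ b := by simpa using (Ne.symm hh)
              simp [cp2, this]
      simp [List.foldl_cons, this, foldl_cp2_nil]
    · by_cases hz : cp2 l0 l = []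
      · simp [List.foldl_cons, hz, foldl_cp2_nil]
      · have hhead : (cp2 l0 l).headD "" = l0.headD "" := by
          cases l0 with
          | nil => simp [cp2_nil_left] at hz
          | cons a t =>
            cases l with
            | nil => simp [cp2_nil_right] at hz
            | cons b u =>
              by_cases hab : a = b
              · simp [cp2, hab]
              · simp [cp2, hab] at hz
        rw [List.foldl_cons]
        exact ih (cp2 l0 l) ⟨x, hx', by rw [hhead]; exact hcase⟩ hz

theorem pvZipStar_cons (l : List String) (ls : List (List String)) :
    pvZipStar (l :: ls) =
      (if l ≠ [] ∧ ls.all (fun x => x ≠ []) then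
        (l.headD "" :: ls.map (fun x => x.headD "")) :: pvZipStar (l.tail :: ls.map (fun x => x.tail))
      else []) := by
  rw [pvZipStar.eq_def]

theorem pvPrefixB_cons (col : List String) (rest : List (List String)) :
    pvPrefixB (col :: rest) =
      (if col.all (fun x => x = col.headD "") then col.headD "" :: pvPrefixB rest else []) := rfl

theorem prefixB_zipStar (l0 : List String) (ls : List (List String)) :
    pvPrefixB (pvZipStar (l0 :: ls)) = List.foldl cp2 l0 ls := by
  rw [pvZipStar_cons]
  by_cases hc : l0 ≠ [] ∧ ls.all (fun x => x ≠ []) = true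
  · obtain ⟨hne, hall⟩ := hc
    obtain ⟨h, t, rfl⟩ : ∃ h t, l0 = h :: t := by
      cases l0 with
      | nil => exact absurd rfl hne
      | cons a t => exact ⟨a, t, rfl⟩
    rw [if_pos ⟨by simp, hall⟩]
    simp only [List.headD_cons, List.tail_cons]
    rw [pvPrefixB_cons]
    simp only [List.headD_cons]
    split_ifs with hh
    · have hh' : ∀ l ∈ ls, l ≠ [] ∧ l.headD "" = h := by
        intro l hl
        refine ⟨by simpa using (List.all_eq_true.mp hall l hl), ?_⟩
        have := List.all_eq_true.mp hh (l.headD "")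
          (List.mem_cons_of_mem _ (List.mem_map.mpr ⟨l, hl, rfl⟩))
        simpa using this
      rw [prefixB_zipStar t (ls.map (fun x => x.tail))]
      exact (foldl_cp2_step ls h t hh').symm
    · have : ∃ l ∈ ls, l = [] ∨ l.headD "" ≠ (h :: t).headD "" := by
        simp only [List.all_eq_true, not_forall] at hh
        obtain ⟨x, hx, hxe⟩ := hh
        rcases List.mem_cons.mp hx with rfl | hx'
        · simp at hxe
        · obtain ⟨l, hl, rfl⟩ := List.mem_map.mp hx'
          exact ⟨l, hl, Or.inr (by simpa using hxe)⟩
      exact (foldl_cp2_dead ls (h :: t) this (by simp)).symm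
  · rw [if_neg hc]
    show ([] : List String) = _
    rcases Classical.em (l0 = []) with rfl | hne
    · exact (foldl_cp2_nil ls).symm
    · have : ∃ l ∈ ls, l = [] ∨ l.headD "" ≠ l0.headD "" := by
        by_contra hno
        exact hc ⟨hne, List.all_eq_true.mpr (fun l hl => by
          simp only [ne_eq, decide_eq_true_eq]
          intro hl0
          exact absurd ⟨l, hl, Or.inl hl0⟩ hno)⟩
      exact (foldl_cp2_dead ls l0 this hne).symm
termination_by l0.length
decreasing_by
  rename_i hex heq
  subst heq
  simp

-- ===== VERDICT (by name: the statement is the Claim_ definition above) =====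
theorem module_path_common_prefix_py_spec : Claim_equal_module_path_common_prefix_py := by
  intro paths _
  unfold Spec_module_path_common_prefix_py module_path_common_prefix_py module_path_common_prefix_py_alt
  cases paths with
  | nil => rfl
  | cons p0 rest =>
    simp only [List.map_cons]
    rw [pvLoopA_foldl, prefixB_zipStar]
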